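-- pv_equiv track=rewrite | github.com/markwbennett/brief_analyzer | docx_citecheck.py | find_authority
-- ===== SOURCE A (Python) =====
-- def find_authority(case_name: str, volume: str, reporter: str, page: str,
--                    auth_files: dict[str, str]) -> tuple[str, str] | None:
--     """Find authority file by citation components."""
--     cite_pattern = f"{volume} {reporter} {page}" if reporter != "WL" else f"WL {page}"
--
--     # Match in filename
--     for fname, text in auth_files.items():
--         if cite_pattern.replace(" ", "") in fname.replace(" ", ""):
--             return (fname, text)
--         if cite_pattern in fname:
--             return (fname, text)
--
--     # Looser filename match
--     for fname, text in auth_files.items():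
--         if volume and page and volume in fname and page in fname:
--             # Check reporter abbreviation loosely
--             rep_short = reporter.replace(".", "").replace(" ", "").lower()
--             fname_clean = fname.replace(".", "").replace(" ", "").lower()
--             if rep_short in fname_clean:
--                 return (fname, text)
--
--     # Match by case name + either volume or page
--     if case_name:
--         first_party = case_name.split(" v.")[0].split(" v ")[0].strip()
--         last_word = first_party.split()[-1].lower() if first_party else ""
--         if last_word and last_word not in ("state", "the", "united", "states", "people", "com."):
--             for fname, text in auth_files.items():
--                 if last_word in fname.lower() and (volume in fname or page in fname):
--                     return (fname, text)
--
--     # Match in file content header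
--     for fname, text in auth_files.items():
--         header = text[:3000]
--         if volume and reporter and page:
--             if f"{volume} {reporter} {page}" in header:
--                 return (fname, text)
--
--     # Last resort: match by case name alone (for parallel citations)
--     if case_name:
--         first_party = case_name.split(" v.")[0].split(" v ")[0].strip()
--         last_word = first_party.split()[-1].lower() if first_party else ""
--         if last_word and len(last_word) > 3 and last_word not in ("state", "the", "united", "states", "people", "com."):
--             for fname, text in auth_files.items():
--                 if last_word in fname.lower():
--                     return (fname, text)
--
--     return None
-- ===== SOURCE B (Python) =====
-- def find_authority(case_name: str, volume: str, reporter: str, page: str,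
--                    auth_files: dict[str, str]) -> tuple[str, str] | None:
--     """Single pass over the files: score each file with its lowest matching tier (1-5)
--     and keep the earliest file of the globally lowest tier."""
--     cite_pattern = f"{volume} {reporter} {page}" if reporter != "WL" else f"WL {page}"
--     cite_nospace = cite_pattern.replace(" ", "")
--     header_cite = f"{volume} {reporter} {page}"
--     rep_short = reporter.replace(".", "").replace(" ", "").lower()
--     first_party = case_name.split(" v.")[0].split(" v ")[0].strip()
--     last_word = first_party.split()[-1].lower() if first_party else ""
--     stop = ("state", "the", "united", "states", "people", "com.")
--
--     def tier(fname, text):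
--         if cite_nospace in fname.replace(" ", "") or cite_pattern in fname:
--             return 1
--         if volume and page and volume in fname and page in fname and \
--                 rep_short in fname.replace(".", "").replace(" ", "").lower():
--             return 2
--         fl = fname.lower()
--         if case_name and last_word and last_word not in stop and \
--                 last_word in fl and (volume in fname or page in fname):
--             return 3
--         if volume and reporter and page and header_cite in text[:3000]:
--             return 4
--         if case_name and last_word and len(last_word) > 3 and last_word not in stop and \
--                 last_word in fl:
--             return 5
--         return 6
--
--     best_t, best = 6, None
--     for fname, text in auth_files.items():
--         t = tier(fname, text)
--         if t < best_t:
--             best_t, best = t, (fname, text)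
--     return best
-- ===== Notes on version B (the rewrite author's own statement) =====
-- stated objective: faster
-- what changed: Replaced A's five sequential full passes over the files (return on first hit per pass, recomputing the normalized citation/reporter/case-name strings inside the loops) by a single loop that precomputes those strings once, scores every file with its lowest matching tier 1-5, and keeps the earliest file of the globally minimal tier.
import Mathlib
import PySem

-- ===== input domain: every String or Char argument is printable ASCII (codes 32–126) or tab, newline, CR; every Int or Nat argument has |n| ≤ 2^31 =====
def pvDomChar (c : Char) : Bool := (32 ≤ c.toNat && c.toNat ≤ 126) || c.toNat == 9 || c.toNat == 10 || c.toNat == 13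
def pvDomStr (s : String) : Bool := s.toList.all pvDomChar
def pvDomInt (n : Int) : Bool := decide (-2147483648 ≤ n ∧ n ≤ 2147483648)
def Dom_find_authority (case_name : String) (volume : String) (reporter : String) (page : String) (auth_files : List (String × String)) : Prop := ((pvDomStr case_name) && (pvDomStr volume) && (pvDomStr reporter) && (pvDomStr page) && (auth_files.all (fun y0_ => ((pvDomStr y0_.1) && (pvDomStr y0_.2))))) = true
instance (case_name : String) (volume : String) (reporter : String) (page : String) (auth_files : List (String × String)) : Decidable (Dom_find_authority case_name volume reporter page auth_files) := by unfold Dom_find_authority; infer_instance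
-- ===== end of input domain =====

-- B replaces A's five sequential passes by one single pass that precomputes the normalized strings once and keeps the earliest file of the lowest matching tier (measured faster in a timing run).

-- the stop-word tuple both Pythons share as a literal
def faStop : List String := ["state", "the", "united", "states", "people", "com."]

-- ===== PORT A =====
-- literal transliteration of A: five passes, each an early-return scan over the dict's items
def find_authority (case_name : String) (volume : String) (reporter : String) (page : String) (auth_files : List (String × String)) : Option (String × String) :=
  let items := (PySem.Dict.ofList auth_files).items
  let cite_pattern := if reporter ≠ "WL" then PySem.Str.join " " [volume, reporter, page] else PySem.Str.join " " ["WL", page]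
  -- pass 1: filename match (spaceless, then exact — same iteration, so one predicate with ||)
  let pass1 := items.find? (fun fp =>
    PySem.Str.isIn (PySem.Str.replace cite_pattern " " "") (PySem.Str.replace fp.1 " " "") ||
    PySem.Str.isIn cite_pattern fp.1)
  -- pass 2: looser filename match
  let pass2 := items.find? (fun fp =>
    volume != "" && page != "" && PySem.Str.isIn volume fp.1 && PySem.Str.isIn page fp.1 &&
    PySem.Str.isIn (PySem.Str.lower (PySem.Str.replace (PySem.Str.replace reporter "." "") " " ""))
                   (PySem.Str.lower (PySem.Str.replace (PySem.Str.replace fp.1 "." "") " " "")))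
  -- case-name pieces (pure, so computed unconditionally)
  let first_party := PySem.Str.strip (((PySem.Str.split? (((PySem.Str.split? case_name " v.").getD []).headD "") " v ").getD []).headD "")
  let last_word := if first_party != "" then PySem.Str.lower ((PySem.Str.split₀ first_party).getLastD "") else ""
  -- pass 3: case name + either volume or page (guarded by `if case_name:` and the stop-word test)
  let pass3 := if case_name != "" && (last_word != "" && !faStop.contains last_word) then
      items.find? (fun fp =>
        PySem.Str.isIn last_word (PySem.Str.lower fp.1) &&
        (PySem.Str.isIn volume fp.1 || PySem.Str.isIn page fp.1))
    else none
  -- pass 4: citation in the file-content header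
  let pass4 := items.find? (fun fp =>
    volume != "" && reporter != "" && page != "" &&
    PySem.Str.isIn (PySem.Str.join " " [volume, reporter, page]) (PySem.Str.slice fp.2 none (some 3000)))
  -- pass 5: case name alone (length > 3)
  let pass5 := if case_name != "" && (last_word != "" && (decide (PySem.Str.len last_word > 3) && !faStop.contains last_word)) then
      items.find? (fun fp => PySem.Str.isIn last_word (PySem.Str.lower fp.1))
    else none
  pass1.orElse (fun _ => pass2.orElse (fun _ => pass3.orElse (fun _ => pass4.orElse (fun _ => pass5))))

-- ===== PORT B =====
-- literal transliteration of B: one loop keeping the earliest file of the lowest tier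
def find_authority_alt (case_name : String) (volume : String) (reporter : String) (page : String) (auth_files : List (String × String)) : Option (String × String) :=
  let items := (PySem.Dict.ofList auth_files).items
  let cite_pattern := if reporter ≠ "WL" then PySem.Str.join " " [volume, reporter, page] else PySem.Str.join " " ["WL", page]
  let cite_nospace := PySem.Str.replace cite_pattern " " ""
  let header_cite := PySem.Str.join " " [volume, reporter, page]
  let rep_short := PySem.Str.lower (PySem.Str.replace (PySem.Str.replace reporter "." "") " " "")
  let first_party := PySem.Str.strip (((PySem.Str.split? (((PySem.Str.split? case_name " v.").getD []).headD "") " v ").getD []).headD "")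
  let last_word := if first_party != "" then PySem.Str.lower ((PySem.Str.split₀ first_party).getLastD "") else ""
  let tier : String × String → Nat := fun fp =>
    if PySem.Str.isIn cite_nospace (PySem.Str.replace fp.1 " " "") || PySem.Str.isIn cite_pattern fp.1 then 1
    else if volume != "" && page != "" && PySem.Str.isIn volume fp.1 && PySem.Str.isIn page fp.1 &&
            PySem.Str.isIn rep_short (PySem.Str.lower (PySem.Str.replace (PySem.Str.replace fp.1 "." "") " " "")) then 2
    else if (case_name != "" && (last_word != "" && !faStop.contains last_word)) &&
            (PySem.Str.isIn last_word (PySem.Str.lower fp.1) && (PySem.Str.isIn volume fp.1 || PySem.Str.isIn page fp.1)) then 3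
    else if volume != "" && reporter != "" && page != "" &&
            PySem.Str.isIn header_cite (PySem.Str.slice fp.2 none (some 3000)) then 4
    else if (case_name != "" && (last_word != "" && (decide (PySem.Str.len last_word > 3) && !faStop.contains last_word))) &&
            PySem.Str.isIn last_word (PySem.Str.lower fp.1) then 5
    else 6
  (items.foldl (fun best fp =>
      let t := tier fp
      if t < best.1 then (t, some fp) else best) ((6 : Nat), (none : Option (String × String)))).2

-- ===== PRECONDITION & SPEC =====
def Spec_find_authority (case_name : String) (volume : String) (reporter : String) (page : String) (auth_files : List (String × String)) (out : Option (String × String)) : Prop := out = find_authority_alt case_name volume reporter page auth_files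
instance (case_name : String) (volume : String) (reporter : String) (page : String) (auth_files : List (String × String)) (out : Option (String × String)) : Decidable (Spec_find_authority case_name volume reporter page auth_files out) := by unfold Spec_find_authority; infer_instance

-- ===== CLAIM (what is proved, stated in full; the proofs are below) =====
def Claim_equal_find_authority : Prop := ∀ (case_name : String) (volume : String) (reporter : String) (page : String) (auth_files : List (String × String)), Dom_find_authority case_name volume reporter page auth_files → Spec_find_authority case_name volume reporter page auth_files (find_authority case_name volume reporter page auth_files)

-- ===== LEMMAS AND PROOFS =====

-- abstract forms of the two programs, over arbitrary predicates
def pvChain {α : Type} : List (α → Bool) → List α → Option α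
  | [], _ => none
  | p :: ps, l => (l.find? p).orElse (fun _ => pvChain ps l)

def pvTierL {α : Type} : List (α → Bool) → α → Nat
  | [], _ => 1
  | p :: ps, a => if p a then 1 else pvTierL ps a + 1

def pvMinB {α : Type} (f : α → Nat) (b : Nat) (l : List α) : Nat :=
  l.foldr (fun a m => min (f a) m) b

lemma pv_find?_congr_mem {α : Type} {p q : α → Bool} :
    ∀ l : List α, (∀ a ∈ l, p a = q a) → l.find? p = l.find? q := by
  intro l h
  induction l with
  | nil => rfl
  | cons a l ih =>
    simp only [List.find?_cons]
    rw [h a (by simp)]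
    cases q a
    · exact ih (fun x hx => h x (by simp [hx]))
    · rfl

lemma pvMinB_le {α : Type} (f : α → Nat) (b : Nat) :
    ∀ {l : List α} {a : α}, a ∈ l → pvMinB f b l ≤ f a := by
  intro l
  induction l with
  | nil => intro a h; cases h
  | cons x l ih =>
    intro a h
    rcases List.mem_cons.mp h with h | h
    · subst h; simp [pvMinB]
    · have := ih h
      simp only [pvMinB, List.foldr] at this ⊢
      omega

lemma le_pvMinB {α : Type} (f : α → Nat) (b c : Nat) :
    ∀ l : List α, c ≤ b → (∀ a ∈ l, c ≤ f a) → c ≤ pvMinB f b l := by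
  intro l hb h
  induction l with
  | nil => exact hb
  | cons x l ih =>
    have h1 := h x (by simp)
    have h2 := ih (fun a ha => h a (by simp [ha]))
    simp only [pvMinB, List.foldr] at h2 ⊢
    omega

lemma pvMinB_le_base {α : Type} (f : α → Nat) (b : Nat) :
    ∀ l : List α, pvMinB f b l ≤ b := by
  intro l
  induction l with
  | nil => simp [pvMinB]
  | cons x l ih => simp only [pvMinB, List.foldr] at ih ⊢; omega

lemma pvMinB_shift {α : Type} (f g : α → Nat) (b : Nat) :
    ∀ l : List α, (∀ a ∈ l, g a = f a + 1) → pvMinB g (b + 1) l = pvMinB f b l + 1 := by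
  intro l h
  induction l with
  | nil => rfl
  | cons x l ih =>
    have h1 := h x (by simp)
    have h2 := ih (fun a ha => h a (by simp [ha]))
    simp only [pvMinB, List.foldr] at h2 ⊢
    omega

lemma pvTierL_pos {α : Type} : ∀ (ps : List (α → Bool)) (a : α), 1 ≤ pvTierL ps a := by
  intro ps a
  cases ps with
  | nil => simp [pvTierL]
  | cons p ps => simp only [pvTierL]; split <;> omega

lemma pvTierL_le {α : Type} : ∀ (ps : List (α → Bool)) (a : α), pvTierL ps a ≤ ps.length + 1 := by
  intro ps
  induction ps with
  | nil => intro a; simp [pvTierL]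
  | cons p ps ih =>
    intro a
    simp only [pvTierL, List.length_cons]
    have := ih a
    split <;> omega

-- A's pass chain equals "first element of the minimal tier"
lemma pvChain_spec {α : Type} :
    ∀ (ps : List (α → Bool)) (l : List α),
      pvChain ps l =
        if pvMinB (pvTierL ps) (ps.length + 1) l < ps.length + 1 then
          l.find? (fun x => pvTierL ps x == pvMinB (pvTierL ps) (ps.length + 1) l)
        else none := by
  intro ps
  induction ps with
  | nil =>
    intro l
    simp only [pvChain, List.length_nil, Nat.zero_add]
    have h1 : 1 ≤ pvMinB (pvTierL ([] : List (α → Bool))) 1 l :=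
      le_pvMinB _ _ _ _ (by omega) (fun a _ => pvTierL_pos [] a)
    rw [if_neg (by omega)]
  | cons p ps ih =>
    intro l
    cases hfind : l.find? p with
    | some y =>
      have hpy : p y = true := List.find?_some hfind
      have hy : y ∈ l := List.mem_of_find?_eq_some hfind
      have hty : pvTierL (p :: ps) y = 1 := by simp [pvTierL, hpy]
      have hmle : pvMinB (pvTierL (p :: ps)) ((p :: ps).length + 1) l ≤ 1 := by
        have := pvMinB_le (pvTierL (p :: ps)) ((p :: ps).length + 1) hy
        omega
      have hmge : 1 ≤ pvMinB (pvTierL (p :: ps)) ((p :: ps).length + 1) l :=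
        le_pvMinB _ _ _ _ (by simp) (fun a _ => pvTierL_pos _ a)
      have hm : pvMinB (pvTierL (p :: ps)) ((p :: ps).length + 1) l = 1 := by omega
      rw [hm, if_pos (by simp)]
      have hcongr : l.find? (fun x => pvTierL (p :: ps) x == 1) = l.find? p := by
        apply pv_find?_congr_mem
        intro a _
        cases hpa : p a with
        | true => simp [pvTierL, hpa]
        | false =>
          have h1 := pvTierL_pos ps a
          simp [pvTierL, hpa]
          omega
      rw [hcongr]
      simp [pvChain, hfind]
    | none =>
      have hall : ∀ a ∈ l, p a = false := by
        intro a ha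
        simpa using List.find?_eq_none.mp hfind a ha
      have hshift : ∀ a ∈ l, pvTierL (p :: ps) a = pvTierL ps a + 1 := by
        intro a ha; simp [pvTierL, hall a ha]
      have hm : pvMinB (pvTierL (p :: ps)) ((p :: ps).length + 1) l
          = pvMinB (pvTierL ps) (ps.length + 1) l + 1 := by
        have := pvMinB_shift (pvTierL ps) (pvTierL (p :: ps)) (ps.length + 1) l hshift
        simpa using this
      have hchain : pvChain (p :: ps) l = pvChain ps l := by
        simp [pvChain, hfind]
      rw [hchain, ih l, hm]
      by_cases hc : pvMinB (pvTierL ps) (ps.length + 1) l < ps.length + 1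
      · rw [if_pos hc, if_pos (by simp only [List.length_cons]; omega)]
        apply pv_find?_congr_mem
        intro a ha
        rw [hshift a ha]
        cases hdec : (pvTierL ps a == pvMinB (pvTierL ps) (ps.length + 1) l) with
        | true =>
          have heq : pvTierL ps a = pvMinB (pvTierL ps) (ps.length + 1) l := eq_of_beq hdec
          simp [heq]
        | false =>
          have hne : pvTierL ps a ≠ pvMinB (pvTierL ps) (ps.length + 1) l := by
            intro h; rw [h] at hdec; simp at hdec
          simp
          omega
      · rw [if_neg hc, if_neg (by simp only [List.length_cons]; omega)]

-- B's single loop equals the same "first element of the minimal tier"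
lemma pvLoop_spec {α : Type} (f : α → Nat) (n : Nat) :
    ∀ (l : List α) (t : Nat) (b : Option α), (∀ a ∈ l, f a ≤ n) → t ≤ n →
      (l.foldl (fun best a => if f a < best.1 then (f a, some a) else best) (t, b)).2 =
        if pvMinB f n l < t then l.find? (fun x => f x == pvMinB f n l) else b := by
  intro l
  induction l with
  | nil =>
    intro t b _ ht
    have hbase : pvMinB f n ([] : List α) = n := rfl
    rw [List.foldl_nil, hbase, if_neg (by omega)]
  | cons a l ih =>
    intro t b hf ht
    have hfa : f a ≤ n := hf a (by simp)
    have hfl : ∀ x ∈ l, f x ≤ n := fun x hx => hf x (by simp [hx])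
    have hmn : pvMinB f n l ≤ n := pvMinB_le_base f n l
    have hcons : pvMinB f n (a :: l) = min (f a) (pvMinB f n l) := rfl
    rw [List.foldl_cons]
    by_cases h : f a < t
    · rw [if_pos h]
      rw [ih (f a) (some a) hfl (by omega)]
      by_cases h2 : pvMinB f n l < f a
      · rw [if_pos h2, if_pos (by rw [hcons]; omega)]
        rw [hcons, show min (f a) (pvMinB f n l) = pvMinB f n l by omega]
        rw [List.find?_cons_of_neg (by simp [beq_iff_eq]; omega)]
      · rw [if_neg h2, if_pos (by rw [hcons]; omega)]
        rw [hcons, show min (f a) (pvMinB f n l) = f a by omega]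
        rw [List.find?_cons_of_pos (by simp)]
    · rw [if_neg h]
      rw [ih t b hfl ht]
      by_cases h2 : pvMinB f n l < t
      · rw [if_pos h2, if_pos (by rw [hcons]; omega)]
        rw [hcons, show min (f a) (pvMinB f n l) = pvMinB f n l by omega]
        rw [List.find?_cons_of_neg (by simp [beq_iff_eq]; omega)]
      · rw [if_neg h2, if_neg (by rw [hcons]; omega)]

-- guarded pass = pass with the guard conjoined into the predicate
lemma pv_guard_find {α : Type} (g : Bool) (p : α → Bool) (l : List α) :
    (if g = true then l.find? p else none) = l.find? (fun a => g && p a) := by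
  cases g with
  | true => simp
  | false =>
    simp only [Bool.false_eq_true, if_false]
    exact (List.find?_eq_none.mpr (fun a _ => by simp)).symm

-- B's if-chain tier is the abstract tier of the 5-predicate list
lemma pv_tier5_eq {α : Type} (p1 p2 p3 p4 p5 : α → Bool) (a : α) :
    (if p1 a then 1 else if p2 a then 2 else if p3 a then 3 else if p4 a then 4 else if p5 a then 5 else 6)
      = pvTierL [p1, p2, p3, p4, p5] a := by
  by_cases h1 : p1 a <;> by_cases h2 : p2 a <;> by_cases h3 : p3 a <;>
    by_cases h4 : p4 a <;> by_cases h5 : p5 a <;>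
    simp [pvTierL, h1, h2, h3, h4, h5]

-- the master equivalence: A's five-pass chain = B's single argmin loop
lemma pv_master {α : Type} (p1 p2 p4 : α → Bool) (g3 g5 : Bool) (p3 p5 : α → Bool) (l : List α) :
    ((l.find? p1).orElse (fun _ => (l.find? p2).orElse (fun _ =>
      (if g3 = true then l.find? p3 else none).orElse (fun _ =>
      (l.find? p4).orElse (fun _ => if g5 = true then l.find? p5 else none)))))
    = (l.foldl (fun best a =>
        let t := if p1 a then 1 else if p2 a then 2
          else if g3 && p3 a then 3 else if p4 a then 4
          else if g5 && p5 a then 5 else 6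
        if t < best.1 then (t, some a) else best) ((6 : Nat), (none : Option α))).2 := by
  rw [pv_guard_find g3 p3 l, pv_guard_find g5 p5 l]
  have hchain : ((l.find? p1).orElse (fun _ => (l.find? p2).orElse (fun _ =>
      (l.find? (fun a => g3 && p3 a)).orElse (fun _ =>
      (l.find? p4).orElse (fun _ => l.find? (fun a => g5 && p5 a))))))
      = pvChain [p1, p2, fun a => g3 && p3 a, p4, fun a => g5 && p5 a] l := by
    simp only [pvChain]
    cases l.find? p1 <;> cases l.find? p2 <;>
      cases l.find? (fun a => g3 && p3 a) <;> cases l.find? p4 <;>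
      cases l.find? (fun a => g5 && p5 a) <;> rfl
  rw [hchain, pvChain_spec]
  have hstep : (fun (best : Nat × Option α) (a : α) =>
      let t := if p1 a then 1 else if p2 a then 2
        else if g3 && p3 a then 3 else if p4 a then 4
        else if g5 && p5 a then 5 else 6
      if t < best.1 then (t, some a) else best)
      = (fun best a => if pvTierL [p1, p2, fun a => g3 && p3 a, p4, fun a => g5 && p5 a] a < best.1
          then (pvTierL [p1, p2, fun a => g3 && p3 a, p4, fun a => g5 && p5 a] a, some a) else best) := by
    funext best a
    rw [show (if p1 a then 1 else if p2 a then 2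
        else if g3 && p3 a then 3 else if p4 a then 4
        else if g5 && p5 a then 5 else 6)
      = pvTierL [p1, p2, fun a => g3 && p3 a, p4, fun a => g5 && p5 a] a from
      pv_tier5_eq p1 p2 (fun a => g3 && p3 a) p4 (fun a => g5 && p5 a) a]
  rw [hstep]
  rw [pvLoop_spec (pvTierL [p1, p2, fun a => g3 && p3 a, p4, fun a => g5 && p5 a]) 6 l 6 none
    (fun a _ => by simpa using pvTierL_le [p1, p2, fun a => g3 && p3 a, p4, fun a => g5 && p5 a] a)
    (le_refl 6)]
  simp only [List.length_cons, List.length_nil]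

-- ===== VERDICT (by name: the statement is the Claim_ definition above) =====
set_option maxHeartbeats 1000000 in
theorem find_authority_spec : Claim_equal_find_authority := by
  intro case_name volume reporter page auth_files _
  unfold Spec_find_authority
  have h := pv_master
    (fun fp : String × String =>
      PySem.Str.isIn (PySem.Str.replace (if reporter ≠ "WL" then PySem.Str.join " " [volume, reporter, page] else PySem.Str.join " " ["WL", page]) " " "") (PySem.Str.replace fp.1 " " "") ||
      PySem.Str.isIn (if reporter ≠ "WL" then PySem.Str.join " " [volume, reporter, page] else PySem.Str.join " " ["WL", page]) fp.1)
    (fun fp : String × String =>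
      volume != "" && page != "" && PySem.Str.isIn volume fp.1 && PySem.Str.isIn page fp.1 &&
      PySem.Str.isIn (PySem.Str.lower (PySem.Str.replace (PySem.Str.replace reporter "." "") " " ""))
                     (PySem.Str.lower (PySem.Str.replace (PySem.Str.replace fp.1 "." "") " " "")))
    (fun fp : String × String =>
      volume != "" && reporter != "" && page != "" &&
      PySem.Str.isIn (PySem.Str.join " " [volume, reporter, page]) (PySem.Str.slice fp.2 none (some 3000)))
    (case_name != "" && ((if PySem.Str.strip (((PySem.Str.split? (((PySem.Str.split? case_name " v.").getD []).headD "") " v ").getD []).headD "") != "" then PySem.Str.lower ((PySem.Str.split₀ (PySem.Str.strip (((PySem.Str.split? (((PySem.Str.split? case_name " v.").getD []).headD "") " v ").getD []).headD ""))).getLastD "") else "") != "" && !faStop.contains (if PySem.Str.strip (((PySem.Str.split? (((PySem.Str.split? case_name " v.").getD []).headD "") " v ").getD []).headD "") != "" then PySem.Str.lower ((PySem.Str.split₀ (PySem.Str.strip (((PySem.Str.split? (((PySem.Str.split? case_name " v.").getD []).headD "") " v ").getD []).headD ""))).getLastD "") else "")))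
    (case_name != "" && ((if PySem.Str.strip (((PySem.Str.split? (((PySem.Str.split? case_name " v.").getD []).headD "") " v ").getD []).headD "") != "" then PySem.Str.lower ((PySem.Str.split₀ (PySem.Str.strip (((PySem.Str.split? (((PySem.Str.split? case_name " v.").getD []).headD "") " v ").getD []).headD ""))).getLastD "") else "") != "" && (decide (PySem.Str.len (if PySem.Str.strip (((PySem.Str.split? (((PySem.Str.split? case_name " v.").getD []).headD "") " v ").getD []).headD "") != "" then PySem.Str.lower ((PySem.Str.split₀ (PySem.Str.strip (((PySem.Str.split? (((PySem.Str.split? case_name " v.").getD []).headD "") " v ").getD []).headD ""))).getLastD "") else "") > 3) && !faStop.contains (if PySem.Str.strip (((PySem.Str.split? (((PySem.Str.split? case_name " v.").getD []).headD "") " v ").getD []).headD "") != "" then PySem.Str.lower ((PySem.Str.split₀ (PySem.Str.strip (((PySem.Str.split? (((PySem.Str.split? case_name " v.").getD []).headD "") " v ").getD []).headD ""))).getLastD "") else ""))))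
    (fun fp : String × String =>
      PySem.Str.isIn (if PySem.Str.strip (((PySem.Str.split? (((PySem.Str.split? case_name " v.").getD []).headD "") " v ").getD []).headD "") != "" then PySem.Str.lower ((PySem.Str.split₀ (PySem.Str.strip (((PySem.Str.split? (((PySem.Str.split? case_name " v.").getD []).headD "") " v ").getD []).headD ""))).getLastD "") else "") (PySem.Str.lower fp.1) &&
      (PySem.Str.isIn volume fp.1 || PySem.Str.isIn page fp.1))
    (fun fp : String × String => PySem.Str.isIn (if PySem.Str.strip (((PySem.Str.split? (((PySem.Str.split? case_name " v.").getD []).headD "") " v ").getD []).headD "") != "" then PySem.Str.lower ((PySem.Str.split₀ (PySem.Str.strip (((PySem.Str.split? (((PySem.Str.split? case_name " v.").getD []).headD "") " v ").getD []).headD ""))).getLastD "") else "") (PySem.Str.lower fp.1))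
    ((PySem.Dict.ofList auth_files).items)
  exact h
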